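-- pv_equiv track=rewrite | github.com/MarreJohansen/AOC23 | puzzle 4/4.py | checkFunc
-- ===== SOURCE A (Python) =====
-- def checkFunc(winNumbers, checkNumbers):
--     first_val = False
--     count = 0
--     scratchCount = 0
--     for win in winNumbers:
--         for check in checkNumbers:
--             if (check == win):
--                 if (first_val == True):
--                     count *= 2
--                 else:
--                     first_val = True
--                     count += 1
--                 scratchCount += 1
--     return count, scratchCount
-- ===== SOURCE B (Python) =====
-- def checkFunc(winNumbers, checkNumbers):
--     counts = {}
--     for c in checkNumbers:
--         counts[c] = counts.get(c, 0) + 1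
--     k = sum(counts.get(w, 0) for w in winNumbers)
--     return (2 ** (k - 1) if k else 0, k)
-- ===== Notes on version B (the rewrite author's own statement) =====
-- stated objective: alternative
-- what changed: Replaced the nested scan over all (win, check) pairs and the doubling loop state by a one-pass count dictionary of checkNumbers plus the closed form count = 2^(k-1) for k > 0 matches; intended as faster (measured 51.9x at n=256) but unconfirmed at the largest size, where both time out on the huge 2^k output.
import Mathlib
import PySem

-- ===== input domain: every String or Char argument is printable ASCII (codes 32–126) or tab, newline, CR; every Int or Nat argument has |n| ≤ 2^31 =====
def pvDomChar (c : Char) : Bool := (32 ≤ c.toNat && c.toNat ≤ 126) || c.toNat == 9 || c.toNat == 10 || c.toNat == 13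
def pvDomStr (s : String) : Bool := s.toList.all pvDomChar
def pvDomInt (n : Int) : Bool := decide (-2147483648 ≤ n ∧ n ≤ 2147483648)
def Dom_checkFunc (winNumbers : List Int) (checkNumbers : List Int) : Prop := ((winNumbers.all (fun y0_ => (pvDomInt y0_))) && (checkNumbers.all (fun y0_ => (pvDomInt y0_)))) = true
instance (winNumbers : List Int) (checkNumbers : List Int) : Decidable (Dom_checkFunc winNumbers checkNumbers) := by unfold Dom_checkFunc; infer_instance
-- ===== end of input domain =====

-- B replaces A's nested pair scan and doubling loop state by a one-pass count dictionary of
-- checkNumbers and the closed form 2^(k-1) for k > 0 total matches (a different algorithm).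

-- ===== PORT A =====
-- state = (first_val, count, scratchCount), exactly A's loop variables
def checkFunc (winNumbers : List Int) (checkNumbers : List Int) : Int × Int :=
  let st := winNumbers.foldl (fun st win =>
    checkNumbers.foldl (fun st check =>
      if check == win then
        if st.1 = true then (st.1, st.2.1 * 2, st.2.2 + 1)
        else (true, st.2.1 + 1, st.2.2 + 1)
      else st) st) (false, 0, 0)
  (st.2.1, st.2.2)

-- ===== PORT B =====
def checkFunc_alt (winNumbers : List Int) (checkNumbers : List Int) : Int × Int :=
  let counts := checkNumbers.foldl (fun d c => d.insert c (d.getD c 0 + 1)) PySem.Dict.empty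
  let k := winNumbers.foldl (fun acc w => acc + counts.getD w 0) 0
  (if k = 0 then 0 else 2 ^ (k - 1).toNat, k)

-- ===== PRECONDITION & SPEC =====
def Spec_checkFunc (winNumbers : List Int) (checkNumbers : List Int) (out : Int × Int) : Prop := out = checkFunc_alt winNumbers checkNumbers
instance (winNumbers : List Int) (checkNumbers : List Int) (out : Int × Int) : Decidable (Spec_checkFunc winNumbers checkNumbers out) := by unfold Spec_checkFunc; infer_instance

-- ===== CLAIM (what is proved, stated in full; the proofs are below) =====
def Claim_equal_checkFunc : Prop := ∀ (winNumbers : List Int) (checkNumbers : List Int), Dom_checkFunc winNumbers checkNumbers → Spec_checkFunc winNumbers checkNumbers (checkFunc winNumbers checkNumbers)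

-- ===== LEMMAS AND PROOFS =====

-- canonical loop state of A after s matches
def pvCanon (s : Nat) : Bool × Int × Int :=
  (s != 0, if s = 0 then 0 else 2 ^ (s - 1), (s : Int))

theorem pvStep_canon (w c : Int) (s : Nat) :
    (if c == w then
      if (pvCanon s).1 = true then ((pvCanon s).1, (pvCanon s).2.1 * 2, (pvCanon s).2.2 + 1)
      else (true, (pvCanon s).2.1 + 1, (pvCanon s).2.2 + 1)
    else pvCanon s) = pvCanon (s + if c == w then 1 else 0) := by
  by_cases h : c == w
  · simp [h, pvCanon]
    cases s with
    | zero => simp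
    | succ n => simp [pow_succ]
  · simp [h, pvCanon]

theorem pvInner (w : Int) (cs : List Int) (s : Nat) :
    cs.foldl (fun st check =>
      if check == w then
        if st.1 = true then (st.1, st.2.1 * 2, st.2.2 + 1)
        else (true, st.2.1 + 1, st.2.2 + 1)
      else st) (pvCanon s) = pvCanon (s + cs.count w) := by
  induction cs generalizing s with
  | nil => simp
  | cons c cs ih =>
    simp only [List.foldl_cons]
    rw [pvStep_canon w c s, ih]
    congr 1
    rw [List.count_cons]
    by_cases h : c == w
    · simp [h, beq_iff_eq] at *; omega
    · simp [h, beq_iff_eq] at *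

theorem pvOuter (ws cs : List Int) (s : Nat) :
    ws.foldl (fun st win =>
      cs.foldl (fun st check =>
        if check == win then
          if st.1 = true then (st.1, st.2.1 * 2, st.2.2 + 1)
          else (true, st.2.1 + 1, st.2.2 + 1)
        else st) st) (pvCanon s) = pvCanon (s + (ws.map (fun x => cs.count x)).sum) := by
  induction ws generalizing s with
  | nil => simp
  | cons w ws ih =>
    simp only [List.foldl_cons, List.map_cons, List.sum_cons]
    rw [pvInner w cs s, ih]
    congr 1
    omega

theorem pvKsum (ws cs : List Int) (a : Int) :
    ws.foldl (fun acc w => acc + (cs.count w : Int)) a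
      = a + ((ws.map (fun x => cs.count x)).sum : Nat) := by
  induction ws generalizing a with
  | nil => simp
  | cons w ws ih =>
    simp only [List.foldl_cons, List.map_cons, List.sum_cons, ih]
    push_cast; ring

-- ===== VERDICT (by name: the statement is the Claim_ definition above) =====
theorem checkFunc_spec : Claim_equal_checkFunc := by
  intro ws cs _
  unfold Spec_checkFunc checkFunc checkFunc_alt
  simp only [PySem.Dict.foldl_insert_getD_add_one_eq_counter, PySem.Dict.getD_counter]
  rw [pvKsum ws cs 0]
  have h0 : ((false, (0 : Int), (0 : Int)) : Bool × Int × Int) = pvCanon 0 := by simp [pvCanon]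
  rw [h0, pvOuter ws cs 0]
  set K := (ws.map (fun x => cs.count x)).sum with hK
  simp only [zero_add, pvCanon]
  by_cases hz : K = 0
  · simp [hz]
  · have h1 : ((K : Int) - 1).toNat = K - 1 := by omega
    simp [hz, h1]
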